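-- pv_equiv track=rewrite | github.com/yu8ikmnbgt6y/MyAOJ | ALDS/ALDS1_6_C.py | shcd_order
-- ===== SOURCE A (Python) =====
-- def shcd_order(cards):
--     orders = {}
--     for card in cards:
--         if card[1] not in orders:
--             orders[card[1]] = [card[0]]
--         else:
--             orders[card[1]].append(card[0])
--     return orders
-- ===== SOURCE B (Python) =====
-- def shcd_order(cards):
--     keys = dict.fromkeys(card[1] for card in cards)
--     return {k: [card[0] for card in cards if card[1] == k] for k in keys}
-- ===== Notes on version B (the rewrite author's own statement) =====
-- stated objective: alternative
-- what changed: Replaced the single incremental dict-building pass (conditional insert/append per card) by a two-phase strategy: first collect the distinct suit keys in first-occurrence order with dict.fromkeys, then build each group's list with its own comprehension scan over the cards.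
import Mathlib
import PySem

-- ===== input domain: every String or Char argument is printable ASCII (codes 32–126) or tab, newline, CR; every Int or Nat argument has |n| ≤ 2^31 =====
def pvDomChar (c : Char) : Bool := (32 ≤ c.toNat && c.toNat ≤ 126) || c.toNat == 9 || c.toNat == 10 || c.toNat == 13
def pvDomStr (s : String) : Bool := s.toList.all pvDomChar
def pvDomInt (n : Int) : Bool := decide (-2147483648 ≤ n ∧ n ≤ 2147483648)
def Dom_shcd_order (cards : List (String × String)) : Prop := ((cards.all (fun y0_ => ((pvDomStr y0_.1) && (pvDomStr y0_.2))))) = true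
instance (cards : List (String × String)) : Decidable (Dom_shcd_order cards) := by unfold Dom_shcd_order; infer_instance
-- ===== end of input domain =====

-- B replaces A's single incremental dict-building pass by a two-phase strategy
-- (collect distinct keys first, then one comprehension scan per key); same result.

-- ===== PORT A =====
-- one pass: if key unseen, start a singleton group, else append to the existing group
def shcd_order (cards : List (String × String)) : List (String × List String) :=
  (cards.foldl
    (fun (orders : PySem.Dict String (List String)) card =>
      if orders.contains card.2 = false then
        orders.insert card.2 [card.1]
      else
        orders.modify card.2 [] (fun l => l ++ [card.1]))
    PySem.Dict.empty).items

-- ===== PORT B =====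
-- distinct keys in first-occurrence order (dict.fromkeys), then one filter-scan per key
def shcd_order_alt (cards : List (String × String)) : List (String × List String) :=
  (PySem.List.dedup (cards.map (·.2))).map
    (fun k => (k, (cards.filter (fun card => card.2 == k)).map (·.1)))

-- ===== PRECONDITION & SPEC =====
def Spec_shcd_order (cards : List (String × String)) (out : List (String × List String)) : Prop := out = shcd_order_alt cards
instance (cards : List (String × String)) (out : List (String × List String)) : Decidable (Spec_shcd_order cards out) := by unfold Spec_shcd_order; infer_instance

-- ===== CLAIM (what is proved, stated in full; the proofs are below) =====
def Claim_equal_shcd_order : Prop := ∀ (cards : List (String × String)), Dom_shcd_order cards → Spec_shcd_order cards (shcd_order cards)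

-- ===== LEMMAS AND PROOFS =====

-- A's conditional insert/append step is exactly the unconditional modify-append step.
theorem shcd_order_step_eq (d : PySem.Dict String (List String)) (card : String × String) :
    (if d.contains card.2 = false then d.insert card.2 [card.1]
     else d.modify card.2 [] (fun l => l ++ [card.1]))
    = d.modify card.2 [] (fun l => l ++ [card.1]) := by
  by_cases h : d.contains card.2 = false
  · simp [h, PySem.Dict.modify, PySem.Dict.getD_of_not_contains d [] h]
  · simp [h]

theorem shcd_order_eq_modify_fold (cards : List (String × String)) :
    shcd_order cards =
      (cards.foldl (fun (d : PySem.Dict String (List String)) card =>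
        d.modify card.2 [] (fun l => l ++ [card.1])) PySem.Dict.empty).items := by
  unfold shcd_order
  exact congrArg PySem.Dict.items
    (PySem.List.foldl_congr_mem cards _ _ _ (fun acc x _ => shcd_order_step_eq acc x))

-- ===== VERDICT (by name: the statement is the Claim_ definition above) =====
theorem shcd_order_spec : Claim_equal_shcd_order := by
  intro cards _
  show shcd_order cards = shcd_order_alt cards
  rw [shcd_order_eq_modify_fold]
  set F := (cards.foldl (fun (d : PySem.Dict String (List String)) card =>
      d.modify card.2 [] (fun l => l ++ [card.1])) PySem.Dict.empty) with hF
  have hkeys : F.keys = PySem.List.dedup (cards.map (·.2)) := by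
    rw [hF, PySem.Dict.keys_foldl_modify_key]
    simp [PySem.Set.update, PySem.Set.ofList_eq_foldl, PySem.Dict.empty]
  have hnd : F.keys.Nodup := by
    rw [hkeys]; exact PySem.List.nodup_dedup _
  rw [PySem.Dict.items_eq_map_keys F hnd [], hkeys]
  unfold shcd_order_alt
  apply List.map_congr_left
  intro k hk
  have hget : F.getD k [] = (cards.filter (fun card => card.2 == k)).map (·.1) := by
    rw [hF]
    have : (cards.foldl (fun (d : PySem.Dict String (List String)) card =>
        d.modify card.2 [] (fun l => l ++ [card.1])) PySem.Dict.empty)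
        = ((cards.map Prod.swap).foldl (fun (d : PySem.Dict String (List String)) p =>
            d.modify p.1 [] (fun l => l ++ [p.2])) PySem.Dict.empty) := by
      rw [List.foldl_map]; rfl
    rw [this, PySem.Dict.getD_foldl_modify_append]
    simp [List.filter_map, Function.comp_def]
  rw [hget]
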